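-- pv_equiv track=rewrite | github.com/AytugUlubay/codeWarsPython | kyu7/Double Every Other.py | double_every_other
-- ===== SOURCE A (Python) =====
-- def double_every_other(lst):
--     l=[]
--     for i in range(len(lst)):
--         if i%2==0:
--             l.append(lst[i])
--         else:
--             l.append(2*lst[i])
--     return(l)
-- ===== SOURCE B (Python) =====
-- def double_every_other(lst):
--     out = []
--     it = iter(lst)
--     for a, b in zip(it, it):
--         out += [a, 2 * b]
--     if len(lst) % 2:
--         out.append(lst[-1])
--     return out
-- ===== Notes on version B (the rewrite author's own statement) =====
-- stated objective: alternative
-- what changed: B pairs up the elements with zip(it, it) and emits [a, 2*b] per pair (plus the last element for odd length), dropping A's index loop and i%2 parity branch entirely.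
import Mathlib
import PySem

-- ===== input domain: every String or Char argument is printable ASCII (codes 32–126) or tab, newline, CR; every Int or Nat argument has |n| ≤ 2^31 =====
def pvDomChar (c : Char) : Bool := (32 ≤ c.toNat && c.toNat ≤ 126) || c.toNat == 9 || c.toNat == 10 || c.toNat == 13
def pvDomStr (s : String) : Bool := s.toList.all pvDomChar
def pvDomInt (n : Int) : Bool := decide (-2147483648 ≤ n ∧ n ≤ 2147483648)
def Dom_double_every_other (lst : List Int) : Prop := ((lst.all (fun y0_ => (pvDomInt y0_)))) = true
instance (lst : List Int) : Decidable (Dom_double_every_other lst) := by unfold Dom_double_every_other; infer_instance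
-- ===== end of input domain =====

-- B replaces A's index loop with parity branch by a pairwise pass (zip(it,it)) emitting [a, 2*b]
-- per pair plus the trailing element for odd length: an alternative decomposition, same cost.

-- ===== PORT A =====
-- lst[i] with 0 ≤ i < len(lst) is always in range, so the total pyGetD with default 0 is exact.
def double_every_other (lst : List Int) : List Int :=
  (PySem.List.pyRange 0 (PySem.List.len lst)).foldl
    (fun l i =>
      if PySem.Int.mod i 2 == 0 then l ++ [PySem.List.pyGetD lst i 0]
      else l ++ [2 * PySem.List.pyGetD lst i 0]) []

-- ===== PORT B =====
-- exact port of Python's `zip(it, it)` over an iterator of lst: consecutive disjoint pairs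
def pvPairs : List Int → List (Int × Int)
  | a :: b :: rest => (a, b) :: pvPairs rest
  | _ => []

-- `if len(lst) % 2:` is truthiness of the int; lst[-1] is in range there (lst nonempty), so pyGetD is exact.
def double_every_other_alt (lst : List Int) : List Int :=
  let out := (pvPairs lst).foldl (fun out p => out ++ [p.1, 2 * p.2]) []
  if PySem.Int.mod (PySem.List.len lst) 2 ≠ 0 then out ++ [PySem.List.pyGetD lst (-1) 0]
  else out

-- ===== PRECONDITION & SPEC =====
def Spec_double_every_other (lst : List Int) (out : List Int) : Prop := out = double_every_other_alt lst
instance (lst : List Int) (out : List Int) : Decidable (Spec_double_every_other lst out) := by unfold Spec_double_every_other; infer_instance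

-- ===== CLAIM (what is proved, stated in full; the proofs are below) =====
def Claim_equal_double_every_other : Prop := ∀ (lst : List Int), Dom_double_every_other lst → Spec_double_every_other lst (double_every_other lst)

-- ===== LEMMAS AND PROOFS =====

-- float the if over the appends so the library map lemma applies
lemma foldl_ite_append (p : Int → Bool) (f g : Int → Int) (l : List Int) (acc : List Int) :
    List.foldl (fun l i => if p i then l ++ [f i] else l ++ [g i]) acc l
      = acc ++ l.map (fun i => if p i then f i else g i) := by
  have h : (fun (l : List Int) i => if p i then l ++ [f i] else l ++ [g i])
      = fun l i => l ++ [if p i then f i else g i] := by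
    funext l i; split_ifs <;> rfl
  rw [h, PySem.List.foldl_append_singleton_eq_map]

-- A's loop written as a map over List.range
lemma portA_eq_map (lst : List Int) :
    double_every_other lst
      = (List.range lst.length).map
          (fun k => if k % 2 = 0 then lst.getD k 0 else 2 * lst.getD k 0) := by
  unfold double_every_other
  rw [PySem.List.len_eq, PySem.List.pyRange_zero_natCast, foldl_ite_append]
  simp only [List.map_map, Function.comp_def, PySem.List.pyGetD_natCast]
  apply List.map_congr_left
  intro k _
  have h2 : ((2:Int) ∣ (k:Int)) ↔ k % 2 = 0 := by omega
  simp [h2]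

-- B's fold written as a flatMap over the pairs
lemma portB_eq (lst : List Int) :
    double_every_other_alt lst
      = (pvPairs lst).flatMap (fun p => [p.1, 2 * p.2])
          ++ (if lst.length % 2 = 1 then [PySem.List.pyGetD lst (-1) 0] else []) := by
  unfold double_every_other_alt
  rw [PySem.List.foldl_append_eq_flatMap, PySem.List.len_eq]
  have hm : PySem.Int.mod (lst.length : Int) 2 = ((lst.length % 2 : Nat) : Int) := by
    exact_mod_cast PySem.Int.mod_natCast lst.length 2
  by_cases h : lst.length % 2 = 1
  · rw [hm]; norm_num [h]
  · have h0 : lst.length % 2 = 0 := by omega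
    rw [hm]; simp [h0]

-- xs[-1] on a nonempty list is the last element; unchanged when two elements are dropped in front
lemma pyGetD_neg_one_cons_cons (a b : Int) (rest : List Int) (h : rest ≠ []) :
    PySem.List.pyGetD (a :: b :: rest) (-1) 0 = PySem.List.pyGetD rest (-1) 0 := by
  rw [PySem.List.pyGetD_neg_one (xs := a :: b :: rest) (h := by simp),
      PySem.List.pyGetD_neg_one (xs := rest) (h := h),
      List.getLast_cons (by simp), List.getLast_cons h]

-- main correspondence, two elements at a time
lemma main_eq (lst : List Int) :
    (List.range lst.length).map
        (fun k => if k % 2 = 0 then lst.getD k 0 else 2 * lst.getD k 0)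
      = (pvPairs lst).flatMap (fun p => [p.1, 2 * p.2])
          ++ (if lst.length % 2 = 1 then [PySem.List.pyGetD lst (-1) 0] else []) := by
  induction lst using pvPairs.induct with
  | case1 a b rest ih =>
    have hlen : (a :: b :: rest).length = rest.length + 2 := by simp
    rw [hlen, List.range_succ_eq_map, List.range_succ_eq_map]
    simp only [List.map_cons, List.map_map, Function.comp_def]
    have hmap : (List.range rest.length).map
          (fun k => if (k + 1 + 1) % 2 = 0 then (a :: b :: rest).getD (k + 1 + 1) 0
                    else 2 * (a :: b :: rest).getD (k + 1 + 1) 0)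
        = (List.range rest.length).map
          (fun k => if k % 2 = 0 then rest.getD k 0 else 2 * rest.getD k 0) := by
      apply List.map_congr_left
      intro k _
      have hp : (k + 1 + 1) % 2 = k % 2 := by omega
      simp [hp]
    simp only [Nat.succ_eq_add_one, hmap, ih]
    by_cases hodd : rest.length % 2 = 1
    · have hne : rest ≠ [] := by intro h; rw [h] at hodd; simp at hodd
      simp [pvPairs, hodd, hlen, pyGetD_neg_one_cons_cons a b rest hne]
    · simp [pvPairs, hodd, hlen]
  | case2 l hne =>
    cases l with
    | nil => simp [pvPairs]
    | cons a t =>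
      cases t with
      | nil =>
        rw [PySem.List.pyGetD_neg_one [a] 0 (by simp)]
        simp [pvPairs, List.range_succ_eq_map]
      | cons b t2 => exact (hne a b t2 rfl).elim

-- ===== VERDICT (by name: the statement is the Claim_ definition above) =====
theorem double_every_other_spec : Claim_equal_double_every_other := by
  intro lst _
  unfold Spec_double_every_other
  rw [portA_eq_map, portB_eq, main_eq]
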